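-- pv_equiv track=rewrite | github.com/kfir-wit/PurpleCrayon | purplecrayon/agent/graph.py | extract_description_from_prompt
-- ===== SOURCE A (Python) =====
-- def extract_description_from_prompt(prompt_md: str) -> str:
--     """Extract the description from the markdown prompt."""
--     lines = prompt_md.splitlines()
--
--     # Look for **Description:** line
--     for i, line in enumerate(lines):
--         if line.strip().lower().startswith("**description:**"):
--             # Get the next line(s) until we hit another ** or empty line
--             description_parts = []
--             for j in range(i + 1, len(lines)):
--                 next_line = lines[j].strip()
--                 if not next_line:  # Empty line
--                     break
--                 if next_line.startswith("**"):  # Next section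
--                     break
--                 description_parts.append(next_line)
--
--             if description_parts:
--                 return " ".join(description_parts).strip()
--
--     # Fallback: return first non-empty line that doesn't start with **
--     for line in lines:
--         line = line.strip()
--         if line and not line.startswith("#") and not line.startswith("**") and not line.startswith("-"):
--             return line
--     return "graphic image"
-- ===== SOURCE B (Python) =====
-- def extract_description_from_prompt(prompt_md: str) -> str:
--     """Extract the description from the markdown prompt (single-pass state machine)."""
--     lines = prompt_md.splitlines()
--     collecting = False
--     parts = []
--     for raw in lines:
--         line = raw.strip()
--         if collecting:
--             if line and not line.startswith("**"):
--                 parts.append(line)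
--                 continue
--             if parts:
--                 return " ".join(parts).strip()
--             collecting = False  # fall through: re-test this line as a marker
--         if line.lower().startswith("**description:**"):
--             collecting = True
--             parts = []
--     if parts:
--         return " ".join(parts).strip()
--     # Fallback: first non-empty line not a heading/bold/bullet
--     for raw in lines:
--         line = raw.strip()
--         if line and not line.startswith(("#", "**", "-")):
--             return line
--     return "graphic image"
-- ===== Notes on version B (the rewrite author's own statement) =====
-- stated objective: alternative
-- what changed: Replaced the restarting nested loops (outer marker search with an inner per-marker collection loop) by a single linear pass with an explicit searching/collecting state machine that re-tests a terminating section-delimiter line as a new marker; the fallback scan is kept as a separate pass.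
import Mathlib
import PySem

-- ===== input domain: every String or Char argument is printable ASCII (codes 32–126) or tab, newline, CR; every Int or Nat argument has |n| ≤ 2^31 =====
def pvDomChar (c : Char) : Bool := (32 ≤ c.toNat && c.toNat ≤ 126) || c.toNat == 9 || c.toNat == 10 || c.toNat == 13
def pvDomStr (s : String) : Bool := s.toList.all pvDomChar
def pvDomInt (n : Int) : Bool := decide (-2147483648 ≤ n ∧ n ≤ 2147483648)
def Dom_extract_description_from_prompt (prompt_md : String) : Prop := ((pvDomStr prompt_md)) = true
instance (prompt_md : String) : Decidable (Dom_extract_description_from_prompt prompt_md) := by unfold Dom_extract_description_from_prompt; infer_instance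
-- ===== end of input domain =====

-- B replaces A's restarting nested loops by one linear pass with a searching/collecting state machine (objective: alternative decomposition, same results).

-- ===== PORT A =====
-- inner loop: for j in range(i+1, len(lines)): collect stripped lines until blank or '**'
def pvACollect : List String → List String → List String
  | [], parts => parts
  | l :: rest, parts =>
    let next_line := PySem.Str.strip l
    if next_line = "" then parts
    else if PySem.Str.startswith next_line "**" = true then parts
    else pvACollect rest (parts ++ [next_line])

-- outer loop: for i, line in enumerate(lines): marker test, collect after it, return if nonempty
def pvASearch : List String → Option String
  | [] => none
  | l :: rest =>
    if PySem.Str.startswith (PySem.Str.lower (PySem.Str.strip l)) "**description:**" = true then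
      let parts := pvACollect rest []
      if parts ≠ [] then some (PySem.Str.strip (PySem.Str.join " " parts))
      else pvASearch rest
    else pvASearch rest

-- fallback loop
def pvAFallback : List String → String
  | [] => "graphic image"
  | l :: rest =>
    let line := PySem.Str.strip l
    if line ≠ "" ∧ PySem.Str.startswith line "#" = false ∧
        PySem.Str.startswith line "**" = false ∧ PySem.Str.startswith line "-" = false then
      line
    else pvAFallback rest

def extract_description_from_prompt (prompt_md : String) : String :=
  match pvASearch (PySem.Str.splitlines prompt_md) with
  | some s => s
  | none => pvAFallback (PySem.Str.splitlines prompt_md)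

-- ===== PORT B =====
-- single pass; the Bool is the `collecting` state, `none` means the loop fell through to the fallback
def pvBLoop : List String → Bool → List String → Option String
  | [], _, parts =>
    if parts ≠ [] then some (PySem.Str.strip (PySem.Str.join " " parts)) else none
  | raw :: rest, true, parts =>
    let line := PySem.Str.strip raw
    if line ≠ "" ∧ PySem.Str.startswith line "**" = false then
      pvBLoop rest true (parts ++ [line])
    else if parts ≠ [] then some (PySem.Str.strip (PySem.Str.join " " parts))
    else -- collecting := False; fall through: re-test this line as a marker
      if PySem.Str.startswith (PySem.Str.lower line) "**description:**" = true then
        pvBLoop rest true []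
      else pvBLoop rest false parts
  | raw :: rest, false, parts =>
    if PySem.Str.startswith (PySem.Str.lower (PySem.Str.strip raw)) "**description:**" = true then
      pvBLoop rest true []
    else pvBLoop rest false parts

-- fallback: first non-empty line not starting with '#', '**' or '-'
def pvBFallback : List String → String
  | [] => "graphic image"
  | raw :: rest =>
    let line := PySem.Str.strip raw
    if line ≠ "" ∧ ¬(PySem.Str.startswith line "#" = true ∨
        PySem.Str.startswith line "**" = true ∨ PySem.Str.startswith line "-" = true) then
      line
    else pvBFallback rest

def extract_description_from_prompt_alt (prompt_md : String) : String :=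
  match pvBLoop (PySem.Str.splitlines prompt_md) false [] with
  | some s => s
  | none => pvBFallback (PySem.Str.splitlines prompt_md)

-- ===== PRECONDITION & SPEC =====
def Spec_extract_description_from_prompt (prompt_md : String) (out : String) : Prop := out = extract_description_from_prompt_alt prompt_md
instance (prompt_md : String) (out : String) : Decidable (Spec_extract_description_from_prompt prompt_md out) := by unfold Spec_extract_description_from_prompt; infer_instance

-- ===== CLAIM (what is proved, stated in full; the proofs are below) =====
def Claim_equal_extract_description_from_prompt : Prop := ∀ (prompt_md : String), Dom_extract_description_from_prompt prompt_md → Spec_extract_description_from_prompt prompt_md (extract_description_from_prompt prompt_md)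

-- ===== LEMMAS AND PROOFS =====

-- the two fallback loops agree (A tests the three prefixes as a conjunction of negations, B as a negated disjunction)
theorem fallback_eq (lines : List String) : pvAFallback lines = pvBFallback lines := by
  induction lines with
  | nil => rfl
  | cons l rest ih =>
    simp only [pvAFallback, pvBFallback]
    by_cases h : PySem.Str.strip l ≠ "" ∧ PySem.Str.startswith (PySem.Str.strip l) "#" = false ∧
        PySem.Str.startswith (PySem.Str.strip l) "**" = false ∧
        PySem.Str.startswith (PySem.Str.strip l) "-" = false
    · rw [if_pos h, if_pos ⟨h.1, by rintro (hx | hx | hx) <;> simp_all⟩]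
    · rw [if_neg h, ih,
        if_neg (fun hb : PySem.Str.strip l ≠ "" ∧
            ¬(PySem.Str.startswith (PySem.Str.strip l) "#" = true ∨
              PySem.Str.startswith (PySem.Str.strip l) "**" = true ∨
              PySem.Str.startswith (PySem.Str.strip l) "-" = true) =>
          h ⟨hb.1, Bool.eq_false_iff.mpr (fun hx => hb.2 (Or.inl hx)),
            Bool.eq_false_iff.mpr (fun hx => hb.2 (Or.inr (Or.inl hx))),
            Bool.eq_false_iff.mpr (fun hx => hb.2 (Or.inr (Or.inr hx)))⟩)]

-- A's inner collection is the accumulator plus what it collects from scratch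
theorem aCollect_acc (xs : List String) : ∀ ps, pvACollect xs ps = ps ++ pvACollect xs [] := by
  induction xs with
  | nil => intro ps; simp [pvACollect]
  | cons l rest ih =>
    intro ps
    simp only [pvACollect]
    split_ifs with h1 h2
    · simp
    · simp
    · rw [ih (ps ++ [PySem.Str.strip l]), ih ([] ++ [PySem.Str.strip l])]
      simp

-- core invariant: B's loop in searching state equals A's outer search; in collecting state it
-- equals A's inner collection followed by A's return/continue decision (with re-test of the
-- terminating line as a new marker).
theorem loop_eq (lines : List String) :
    pvBLoop lines false [] = pvASearch lines ∧
    ∀ parts, pvBLoop lines true parts =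
      (if pvACollect lines parts ≠ [] then
        some (PySem.Str.strip (PySem.Str.join " " (pvACollect lines parts)))
      else pvASearch lines) := by
  induction lines with
  | nil =>
    exact ⟨rfl, fun parts => rfl⟩
  | cons l rest ih =>
    obtain ⟨ihF, ihT⟩ := ih
    constructor
    · simp only [pvBLoop, pvASearch]
      by_cases h : PySem.Str.startswith (PySem.Str.lower (PySem.Str.strip l)) "**description:**" = true
      · rw [if_pos h, if_pos h, ihT []]
      · rw [if_neg h, if_neg h]; exact ihF
    · intro parts
      simp only [pvBLoop, pvACollect, pvASearch]
      by_cases h0 : PySem.Str.strip l = ""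
      · -- blank line terminates the collection; it cannot be a marker
        have hcneg : ¬(PySem.Str.strip l ≠ "" ∧
            PySem.Str.startswith (PySem.Str.strip l) "**" = false) := fun hc => hc.1 h0
        have hM : ¬(PySem.Str.startswith (PySem.Str.lower (PySem.Str.strip l))
            "**description:**" = true) := by rw [h0]; decide
        rw [if_neg hcneg, if_pos h0, if_neg hM, if_neg hM]
        by_cases hp : parts ≠ []
        · rw [if_pos hp, if_pos hp]
        · rw [if_neg hp, if_neg hp, not_ne_iff.mp hp]; exact ihF
      · by_cases hss : PySem.Str.startswith (PySem.Str.strip l) "**" = true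
        · -- a '**' line terminates the collection and is re-tested as a marker
          have hcneg : ¬(PySem.Str.strip l ≠ "" ∧
              PySem.Str.startswith (PySem.Str.strip l) "**" = false) := by
            intro hc; rw [hc.2] at hss; exact Bool.false_ne_true hss
          rw [if_neg hcneg, if_neg h0, if_pos hss]
          by_cases hp : parts ≠ []
          · rw [if_pos hp, if_pos hp]
          · rw [if_neg hp, if_neg hp]
            by_cases hm : PySem.Str.startswith (PySem.Str.lower (PySem.Str.strip l))
                "**description:**" = true
            · rw [if_pos hm, if_pos hm, ihT []]
            · rw [if_neg hm, if_neg hm, not_ne_iff.mp hp]; exact ihF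
        · -- content line: both sides append it and continue; the collection is now nonempty
          have hss2 : PySem.Str.startswith (PySem.Str.strip l) "**" = false :=
            Bool.eq_false_iff.mpr hss
          have hne : pvACollect rest (parts ++ [PySem.Str.strip l]) ≠ [] := by
            rw [aCollect_acc rest (parts ++ [PySem.Str.strip l])]
            simp
          rw [if_pos (And.intro h0 hss2), if_neg h0, if_neg hss,
            ihT (parts ++ [PySem.Str.strip l]), if_pos hne, if_pos hne]

-- ===== VERDICT (by name: the statement is the Claim_ definition above) =====
theorem extract_description_from_prompt_spec : Claim_equal_extract_description_from_prompt := by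
  intro prompt_md _
  unfold Spec_extract_description_from_prompt extract_description_from_prompt
    extract_description_from_prompt_alt
  rw [(loop_eq (PySem.Str.splitlines prompt_md)).1, fallback_eq]
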